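-- pv_equiv track=rewrite | github.com/sseongeun/Baekjoon | 프로그래머스/1/82612. 부족한 금액 계산하기/부족한 금액 계산하기.py | solution
-- ===== SOURCE A (Python) =====
-- def solution(price, money, count):
--     sum=0
--     for i in range(1,count+1):
--         sum+=price*i
--     if sum-money>0:
--         return sum-money
--     else:
--         return 0
-- ===== SOURCE B (Python) =====
-- def solution(price, money, count):
--     n = count if count > 0 else 0
--     shortfall = price * n * (n + 1) // 2 - money
--     return shortfall if shortfall > 0 else 0
-- ===== Notes on version B (the rewrite author's own statement) =====
-- stated objective: faster
-- what changed: replaced the O(count) summation loop with the arithmetic-series closed form price*n*(n+1)//2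
import Mathlib
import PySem

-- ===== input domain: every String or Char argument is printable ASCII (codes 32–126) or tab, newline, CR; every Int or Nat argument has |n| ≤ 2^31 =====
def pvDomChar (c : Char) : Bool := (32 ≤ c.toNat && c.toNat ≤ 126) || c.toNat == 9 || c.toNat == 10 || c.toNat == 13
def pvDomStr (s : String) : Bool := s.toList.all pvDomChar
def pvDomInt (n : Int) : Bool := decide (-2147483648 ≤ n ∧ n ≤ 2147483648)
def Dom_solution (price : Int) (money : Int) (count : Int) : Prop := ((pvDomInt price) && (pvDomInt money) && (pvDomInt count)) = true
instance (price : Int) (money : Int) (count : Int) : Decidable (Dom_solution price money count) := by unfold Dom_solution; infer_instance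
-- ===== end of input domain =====

-- B replaces A's O(count) summation loop with the closed form price*n*(n+1)//2 (objective: faster).

-- ===== PORT A =====
def solution (price : Int) (money : Int) (count : Int) : Int :=
  let sum := (PySem.List.pyRange 1 (count + 1) 1).foldl (fun s i => s + price * i) 0
  if sum - money > 0 then sum - money else 0

-- ===== PORT B =====
def solution_alt (price : Int) (money : Int) (count : Int) : Int :=
  let n : Int := if count > 0 then count else 0
  let shortfall := PySem.Int.floordiv (price * n * (n + 1)) 2 - money
  if shortfall > 0 then shortfall else 0

-- ===== PRECONDITION & SPEC =====
def Spec_solution (price : Int) (money : Int) (count : Int) (out : Int) : Prop := out = solution_alt price money count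
instance (price : Int) (money : Int) (count : Int) (out : Int) : Decidable (Spec_solution price money count out) := by unfold Spec_solution; infer_instance

-- ===== CLAIM (what is proved, stated in full; the proofs are below) =====
def Claim_equal_solution : Prop := ∀ (price : Int) (money : Int) (count : Int), Dom_solution price money count → Spec_solution price money count (solution price money count)

-- ===== LEMMAS AND PROOFS =====

def pvTriang : Nat → Int
  | 0 => 0
  | k + 1 => pvTriang k + (k + 1)

theorem pvTriang_two_mul (k : Nat) : 2 * pvTriang k = (k : Int) * (k + 1) := by
  induction k with
  | zero => simp [pvTriang]
  | succ k ih => simp only [pvTriang]; push_cast; push_cast at ih; ring_nf; ring_nf at ih; omega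

theorem pvSumL (price : Int) (k : Nat) (s0 : Int) :
    (PySem.List.pyRange 1 ((k : Int) + 1) 1).foldl (fun s i => s + price * i) s0
      = s0 + price * pvTriang k := by
  induction k generalizing s0 with
  | zero => simp [PySem.List.pyRange_one_eq_nil, pvTriang]
  | succ k ih =>
      have h : (1 : Int) ≤ (k : Int) + 1 := by omega
      have := PySem.List.pyRange_one_succ_right (a := 1) (b := (k : Int) + 1) h
      push_cast
      rw [show ((k : Int) + 1 + 1) = ((k : Int) + 1) + 1 by ring, this,
        List.foldl_append, ih]
      simp [pvTriang]
      push_cast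
      ring
theorem pvFloordiv_eq (price : Int) (k : Nat) :
    PySem.Int.floordiv (price * (k : Int) * ((k : Int) + 1)) 2 = price * pvTriang k := by
  have h : price * (k : Int) * ((k : Int) + 1) = 2 * (price * pvTriang k) := by
    have := pvTriang_two_mul k
    calc price * (k : Int) * ((k : Int) + 1) = price * ((k : Int) * ((k : Int) + 1)) := by ring
      _ = price * (2 * pvTriang k) := by rw [← this]
      _ = 2 * (price * pvTriang k) := by ring
  rw [h]
  simp [PySem.Int.floordiv, Int.mul_fdiv_cancel_left _ (by norm_num : (2 : Int) ≠ 0)]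

-- ===== VERDICT (by name: the statement is the Claim_ definition above) =====
theorem solution_spec : Claim_equal_solution := by
  intro price money count _
  unfold Spec_solution solution solution_alt
  by_cases hc : count > 0
  · have hk : count = ((count.toNat : Nat) : Int) := by omega
    simp only [if_pos hc]
    rw [hk, pvSumL price count.toNat 0, pvFloordiv_eq]
    simp
  · have h1 : count + 1 ≤ 1 := by omega
    rw [PySem.List.pyRange_one_eq_nil h1]
    simp only [if_neg hc, List.foldl_nil]
    norm_num [PySem.Int.floordiv]
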